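-- pv_equiv track=rewrite | github.com/fqf2009/LeetCode | 1746_MaximumSubarraySumAfterOneOperation.py | maxSumAfterOperation
-- ===== SOURCE A (Python) =====
-- from typing import List
--
-- def maxSumAfterOperation(nums: List[int]) -> int:
--     csum = 0
--     min_csum = 0
--     subarr_sum = 0
--     res = 0
--     for v in nums:
--         csum1 = csum + v
--         min_csum1 = min(min_csum, csum1)
--         subarr_sum1 = max(subarr_sum + v, csum + v*v - min_csum)
--         res = max(res, subarr_sum1)
--         csum, min_csum, subarr_sum = csum1, min_csum1, subarr_sum1
--
--     return res
-- ===== SOURCE B (Python) =====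
-- def maxSumAfterOperation(nums):
--     # Pass 1: materialize, for each index, the clamped best no-square subarray
--     # sum ending just before it (Kadane scan).
--     ends = []
--     run = 0
--     for v in nums:
--         ends.append(max(run, 0))
--         run = max(run, 0) + v
--     # Pass 2: DP over (prefix-best, value) pairs for the squared state.
--     best = 0
--     sq = 0
--     for e, v in zip(ends, nums):
--         sq = max(sq + v, e + v * v)
--         best = max(best, sq)
--     return best
-- ===== Notes on version B (the rewrite author's own statement) =====
-- stated objective: alternative
-- what changed: Replaces A's single-pass prefix-sum/running-min-prefix bookkeeping with two staged passes: a Kadane scan that materializes the clamped best no-square sum ending before each index, then a zip loop computing the squared-state DP from that list.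
import Mathlib
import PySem

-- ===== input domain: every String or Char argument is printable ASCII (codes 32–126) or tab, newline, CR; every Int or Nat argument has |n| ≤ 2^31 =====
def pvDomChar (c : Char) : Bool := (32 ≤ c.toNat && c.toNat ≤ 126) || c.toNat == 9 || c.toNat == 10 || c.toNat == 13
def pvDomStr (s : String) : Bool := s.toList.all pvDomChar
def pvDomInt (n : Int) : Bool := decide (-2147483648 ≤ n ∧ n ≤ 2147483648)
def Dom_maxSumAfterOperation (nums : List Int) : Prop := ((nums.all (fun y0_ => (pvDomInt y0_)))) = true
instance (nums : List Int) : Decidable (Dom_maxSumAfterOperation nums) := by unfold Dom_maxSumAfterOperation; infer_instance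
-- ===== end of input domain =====

-- B replaces A's single-pass prefix-sum/min-prefix bookkeeping with two staged passes (a Kadane scan list, then a zip DP); same O(n) cost.


-- ===== PORT A =====
-- loop over nums with state (csum, min_csum, subarr_sum, res), as in A
def pvLoopA : List Int → Int → Int → Int → Int → Int
  | [], _, _, _, res => res
  | v :: t, csum, min_csum, subarr_sum, res =>
    let csum1 := csum + v
    let min_csum1 := min min_csum csum1
    let subarr_sum1 := max (subarr_sum + v) (csum + v * v - min_csum)
    pvLoopA t csum1 min_csum1 subarr_sum1 (max res subarr_sum1)

def maxSumAfterOperation (nums : List Int) : Int :=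
  pvLoopA nums 0 0 0 0

-- ===== PORT B =====
-- pass 1 of Source B: the Kadane scan producing, for each index, max(run, 0)
def pvScanB : List Int → Int → List Int
  | [], _ => []
  | v :: t, run => max run 0 :: pvScanB t (max run 0 + v)

-- pass 2 of Source B: the squared-state DP over the zipped (ends, nums) pairs
def pvZipLoopB : List (Int × Int) → Int → Int → Int
  | [], _, best => best
  | (e, v) :: t, sq, best =>
    let sq1 := max (sq + v) (e + v * v)
    pvZipLoopB t sq1 (max best sq1)

def maxSumAfterOperation_alt (nums : List Int) : Int :=
  pvZipLoopB ((pvScanB nums 0).zip nums) 0 0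

-- ===== PRECONDITION & SPEC =====
def Spec_maxSumAfterOperation (nums : List Int) (out : Int) : Prop := out = maxSumAfterOperation_alt nums
instance (nums : List Int) (out : Int) : Decidable (Spec_maxSumAfterOperation nums out) := by unfold Spec_maxSumAfterOperation; infer_instance

-- ===== CLAIM (what is proved, stated in full; the proofs are below) =====
def Claim_equal_maxSumAfterOperation : Prop := ∀ (nums : List Int), Dom_maxSumAfterOperation nums → Spec_maxSumAfterOperation nums (maxSumAfterOperation nums)

-- ===== LEMMAS AND PROOFS =====

-- Loop invariant: A's (csum - min_csum) equals B's clamped running value max run 0,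
-- and A's subarr_sum is B's sq.
theorem pvLoop_eq (t : List Int) : ∀ (csum min_csum subarr_sum res run : Int),
    csum - min_csum = max run 0 →
    pvLoopA t csum min_csum subarr_sum res
      = pvZipLoopB ((pvScanB t run).zip t) subarr_sum res := by
  induction t with
  | nil => intro _ _ _ _ _ _; rfl
  | cons v t ih =>
    intro csum min_csum subarr_sum res run h
    simp only [pvLoopA, pvScanB, List.zip_cons_cons, pvZipLoopB]
    have e1 : max (subarr_sum + v) (csum + v * v - min_csum)
        = max (subarr_sum + v) (max run 0 + v * v) := by omega
    rw [e1]
    exact ih _ _ _ _ _ (by omega)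

-- ===== VERDICT (by name: the statement is the Claim_ definition above) =====
theorem maxSumAfterOperation_spec : Claim_equal_maxSumAfterOperation := by
  intro nums _
  show maxSumAfterOperation nums = maxSumAfterOperation_alt nums
  exact pvLoop_eq nums 0 0 0 0 0 (by omega)
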